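-- pv_equiv track=rewrite | github.com/MrBrantCode/unitest_baseline | mut_generate/mist_train_cf/cf_29256/solution.py | minInitialEnergy
-- ===== SOURCE A (Python) =====
-- from typing import List
--
-- def minInitialEnergy(energyValues: List[int]) -> int:
--     minInitial = 0
--     currentEnergy = 0
--
--     for energy in energyValues:
--         currentEnergy += energy
--         if currentEnergy < 0:
--             minInitial += abs(currentEnergy)
--             currentEnergy = 0
--
--     return minInitial
-- ===== SOURCE B (Python) =====
-- from typing import List
--
-- def minInitialEnergy(energyValues: List[int]) -> int:
--     total = 0
--     minPrefix = 0
--     for energy in energyValues: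
--         total += energy
--         if total < minPrefix:
--             minPrefix = total
--     return max(0, -minPrefix)
-- ===== Notes on version B (the rewrite author's own statement) =====
-- stated objective: simpler
-- what changed: Replaced A's clamp-and-inject state machine (reset currentEnergy to 0 and accumulate the injected deficit) by a prefix-minimum scan: track the running prefix sum and its minimum, return max(0, -minPrefix).
import Mathlib
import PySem

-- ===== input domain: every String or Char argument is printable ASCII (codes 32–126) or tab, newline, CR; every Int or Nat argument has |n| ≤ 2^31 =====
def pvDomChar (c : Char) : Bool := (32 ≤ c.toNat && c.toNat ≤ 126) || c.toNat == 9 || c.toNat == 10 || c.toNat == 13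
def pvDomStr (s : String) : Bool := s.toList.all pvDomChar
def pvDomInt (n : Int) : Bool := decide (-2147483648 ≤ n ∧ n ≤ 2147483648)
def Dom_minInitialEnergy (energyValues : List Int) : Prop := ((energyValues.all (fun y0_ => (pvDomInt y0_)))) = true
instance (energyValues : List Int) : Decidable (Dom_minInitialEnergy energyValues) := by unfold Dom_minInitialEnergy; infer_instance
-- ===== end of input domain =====

-- B replaces A's clamp-and-inject reset loop by a prefix-sum/minimum scan (simpler, same O(n) cost).
-- ===== PORT A =====
-- A: clamp-and-inject loop, a literal transliteration of Source A
def minInitialEnergy (energyValues : List Int) : Int :=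
  (energyValues.foldl (fun (s : Int × Int) energy =>
    let c := s.2 + energy
    if c < 0 then (s.1 + |c|, 0) else (s.1, c)) (0, 0)).1

-- ===== PORT B =====
-- B: running prefix sum with its minimum, a literal transliteration of Source B
def minInitialEnergy_alt (energyValues : List Int) : Int :=
  let s := energyValues.foldl (fun (s : Int × Int) energy =>
    let t := s.1 + energy
    (t, if t < s.2 then t else s.2)) (0, 0)
  max 0 (-s.2)

-- ===== PRECONDITION & SPEC =====
def Spec_minInitialEnergy (energyValues : List Int) (out : Int) : Prop := out = minInitialEnergy_alt energyValues
instance (energyValues : List Int) (out : Int) : Decidable (Spec_minInitialEnergy energyValues out) := by unfold Spec_minInitialEnergy; infer_instance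

-- ===== CLAIM (what is proved, stated in full; the proofs are below) =====
def Claim_equal_minInitialEnergy : Prop := ∀ (energyValues : List Int), Dom_minInitialEnergy energyValues → Spec_minInitialEnergy energyValues (minInitialEnergy energyValues)

-- ===== LEMMAS AND PROOFS =====

-- ===== VERDICT (by name: the statement is the Claim_ definition above) =====
-- Loop invariant: A's state (m, c) and B's state (t, p) satisfy p ≤ 0, m = -p, c = t + m.
lemma loop_inv (xs : List Int) : ∀ (m c t p : Int), p ≤ 0 → m = -p → c = t + m →
    (xs.foldl (fun (s : Int × Int) energy =>
      let c := s.2 + energy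
      if c < 0 then (s.1 + |c|, 0) else (s.1, c)) (m, c)).1
    = max 0 (-(xs.foldl (fun (s : Int × Int) energy =>
      let t := s.1 + energy
      (t, if t < s.2 then t else s.2)) (t, p)).2) := by
  induction xs with
  | nil => intro m c t p hp hm hc; simp; omega
  | cons e xs ih =>
    intro m c t p hp hm hc
    simp only [List.foldl_cons]
    by_cases h : c + e < 0
    · simp only [h]
      have ht : t + e < p := by omega
      rw [if_pos ht]
      exact ih (m + |c + e|) 0 (t + e) (t + e) (by omega) (by rw [abs_of_neg h]; omega) (by rw [abs_of_neg h]; omega)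
    · simp only [h]
      have ht : ¬ t + e < p := by omega
      rw [if_neg ht]
      exact ih m (c + e) (t + e) p hp hm (by omega)

theorem minInitialEnergy_spec : Claim_equal_minInitialEnergy := by
  intro xs _
  unfold Spec_minInitialEnergy minInitialEnergy minInitialEnergy_alt
  exact loop_inv xs 0 0 0 0 le_rfl rfl rfl
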